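-- pv_equiv track=rewrite | github.com/BennyJane/algorithm_mad | CodingInterviews/Q1-30/Q16.py | Solution
-- ===== SOURCE A (Python) =====
-- def Solution(ori: list, k: int):
--     d = {}
--     for n in ori:
--         if n in d:
--             d[n] += 1
--         else:
--             d[n] = 1
--     type_num = len(d.keys())  # 手机种类
--     type_count = [value for value in d.values()]
--     type_count.sort(reverse=True)
--     for _count in type_count:
--         k -= _count
--         if k >= 0:
--             type_num -= 1
--         else:
--             break
--     return type_num
-- ===== SOURCE B (Python) =====
-- from collections import Counter
-- from itertools import accumulate
-- from bisect import bisect_right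
--
-- def Solution(ori: list, k: int):
--     counts = Counter(ori)
--     cumsums = list(accumulate(sorted(counts.values(), reverse=True)))
--     return len(counts) - bisect_right(cumsums, k)
-- ===== Notes on version B (the rewrite author's own statement) =====
-- stated objective: alternative
-- what changed: Replaces A's manual frequency dict and subtract-and-break greedy loop with a Counter, cumulative sums of the descending counts (itertools.accumulate) and a binary search (bisect_right) for the number of most-frequent types removable within budget k.
import Mathlib
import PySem

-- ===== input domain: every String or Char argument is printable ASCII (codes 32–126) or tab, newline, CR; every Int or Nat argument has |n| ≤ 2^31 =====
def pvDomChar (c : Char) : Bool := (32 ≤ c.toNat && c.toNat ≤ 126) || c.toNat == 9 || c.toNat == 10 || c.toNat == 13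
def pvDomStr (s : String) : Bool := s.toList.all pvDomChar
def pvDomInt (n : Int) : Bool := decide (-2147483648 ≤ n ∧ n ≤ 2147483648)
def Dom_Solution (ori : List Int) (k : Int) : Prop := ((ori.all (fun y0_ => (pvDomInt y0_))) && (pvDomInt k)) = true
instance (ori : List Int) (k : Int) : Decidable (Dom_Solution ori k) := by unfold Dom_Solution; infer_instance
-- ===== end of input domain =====

-- B replaces A's subtract-and-break greedy loop by cumulative sums of the descending
-- counts plus a bisect_right binary search (objective: alternative algorithm, same cost).

-- ===== PORT A =====
-- the 'for _count in type_count: k -= _count; if k >= 0: … else: break' loop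
def SolutionLoop : List Int → Int → Int → Int
  | [], _, num => num
  | c :: cs, k, num =>
      let k' := k - c
      if k' ≥ 0 then SolutionLoop cs k' (num - 1) else num

def Solution (ori : List Int) (k : Int) : Int :=
  let d := ori.foldl
    (fun d n => if d.contains n then d.insert n (d.getD n 0 + 1) else d.insert n (1 : Int))
    PySem.Dict.empty
  let typeNum : Int := (d.keys.length : Int)
  let typeCount := d.values
  let sortedCount := PySem.List.sorted typeCount (fun v => v) true
  SolutionLoop sortedCount k typeNum

-- ===== PORT B =====
-- itertools.accumulate (running sums)
def accumFrom : Int → List Int → List Int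
  | _, [] => []
  | a, c :: cs => (a + c) :: accumFrom (a + c) cs

def Solution_alt (ori : List Int) (k : Int) : Int :=
  let counts := PySem.Dict.counter ori
  let cumsums := accumFrom 0 (PySem.List.sorted counts.values (fun v => v) true)
  (counts.size : Int) - (PySem.List.bisectRight cumsums k : Int)

-- ===== PRECONDITION & SPEC =====
def Spec_Solution (ori : List Int) (k : Int) (out : Int) : Prop := out = Solution_alt ori k
instance (ori : List Int) (k : Int) (out : Int) : Decidable (Spec_Solution ori k out) := by unfold Spec_Solution; infer_instance

-- ===== CLAIM (what is proved, stated in full; the proofs are below) =====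
def Claim_equal_Solution : Prop := ∀ (ori : List Int) (k : Int), Dom_Solution ori k → Spec_Solution ori k (Solution ori k)

-- ===== LEMMAS AND PROOFS =====

lemma accumFrom_shift (cs : List Int) : ∀ a b : Int,
    accumFrom (a + b) cs = (accumFrom b cs).map (a + ·) := by
  induction cs with
  | nil => intro a b; simp [accumFrom]
  | cons c cs ih =>
      intro a b
      simp only [accumFrom, List.map_cons]
      rw [show a + b + c = a + (b + c) by ring, ih a (b + c)]

lemma mem_accumFrom_ge (cs : List Int) : ∀ a p : Int, (∀ c ∈ cs, 0 ≤ c) →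
    p ∈ accumFrom a cs → a ≤ p := by
  induction cs with
  | nil => intro a p _ hp; simp [accumFrom] at hp
  | cons c cs ih =>
      intro a p hc hp
      simp only [accumFrom, List.mem_cons] at hp
      have hc0 : 0 ≤ c := hc c (List.mem_cons_self ..)
      rcases hp with rfl | hp
      · omega
      · have := ih (a + c) p (fun x hx => hc x (List.mem_cons_of_mem _ hx)) hp
        omega

lemma pairwise_accumFrom (cs : List Int) : ∀ a : Int, (∀ c ∈ cs, 0 ≤ c) →
    (accumFrom a cs).Pairwise (· ≤ ·) := by
  induction cs with
  | nil => intro a _; simp [accumFrom]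
  | cons c cs ih =>
      intro a hc
      simp only [accumFrom]
      refine List.Pairwise.cons ?_ (ih (a + c) (fun x hx => hc x (List.mem_cons_of_mem _ hx)))
      intro p hp
      exact mem_accumFrom_ge cs (a + c) p (fun x hx => hc x (List.mem_cons_of_mem _ hx)) hp

-- the greedy subtract-and-break loop counts the prefix sums that stay ≤ k
lemma loop_eq_countP (cs : List Int) : ∀ k num : Int, (∀ c ∈ cs, 0 ≤ c) →
    SolutionLoop cs k num = num - ((accumFrom 0 cs).countP (fun p => decide (p ≤ k)) : Int) := by
  induction cs with
  | nil => intro k num _; simp [SolutionLoop, accumFrom]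
  | cons c cs ih =>
      intro k num hc
      have hc' : ∀ x ∈ cs, (0 : Int) ≤ x := fun x hx => hc x (List.mem_cons_of_mem _ hx)
      simp only [SolutionLoop, accumFrom]
      have hshift : accumFrom (0 + c) cs = (accumFrom 0 cs).map (c + ·) := by
        rw [show (0 : Int) + c = c + 0 by ring, accumFrom_shift cs c 0]
      rw [show (0 : Int) + c = c by ring] at hshift ⊢
      rw [hshift]
      by_cases h : k - c ≥ 0
      · rw [if_pos h, ih (k - c) (num - 1) hc']
        have : ((accumFrom 0 cs).map (c + ·)).countP (fun p => decide (p ≤ k))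
            = (accumFrom 0 cs).countP (fun p => decide (p ≤ k - c)) := by
          rw [List.countP_map]
          apply List.countP_congr
          intro p _
          simp only [Function.comp]
          constructor <;> intro hp <;> simp_all <;> omega
        simp only [List.countP_cons, this]
        have hck : decide (c ≤ k) = true := by simp; omega
        simp [hck]
        omega
      · rw [if_neg h]
        have hzero : ((accumFrom 0 cs).map (c + ·)).countP (fun p => decide (p ≤ k)) = 0 := by
          rw [List.countP_eq_zero]
          intro p hp
          simp only [List.mem_map] at hp
          obtain ⟨q, hq, rfl⟩ := hp
          have := mem_accumFrom_ge cs 0 q hc' hq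
          simp; omega
        simp only [List.countP_cons, hzero]
        have hck : decide (c ≤ k) = false := by simp; omega
        simp [hck]

-- on a ≤-sorted list, bisect_right is the number of elements ≤ x
lemma countP_eq_bisectRight (xs : List Int) (x : Int) (hs : xs.Pairwise (· ≤ ·)) :
    xs.countP (fun p => decide (p ≤ x)) = PySem.List.bisectRight xs x := by
  obtain ⟨hle, hbefore, hafter⟩ := PySem.List.bisectRight_spec xs x hs
  set r := PySem.List.bisectRight xs x with hr
  have hx : xs = xs.take r ++ xs.drop r := (List.take_append_drop r xs).symm
  rw [hx, List.countP_append]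
  have h1 : (xs.take r).countP (fun p => decide (p ≤ x)) = r := by
    have hall : ∀ p ∈ xs.take r, decide (p ≤ x) = true := by
      intro p hp
      rw [List.mem_take_iff_getElem] at hp
      obtain ⟨j, hj, rfl⟩ := hp
      have hjr : j < r := lt_of_lt_of_le hj (min_le_left _ _)
      have hjl : j < xs.length := lt_of_lt_of_le hj (min_le_right _ _)
      simpa using hbefore j hjl hjr
    rw [List.countP_eq_length.mpr hall, List.length_take, min_eq_left hle]
  have h2 : (xs.drop r).countP (fun p => decide (p ≤ x)) = 0 := by
    rw [List.countP_eq_zero]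
    intro p hp
    rw [List.mem_drop_iff_getElem] at hp
    obtain ⟨j, hj, rfl⟩ := hp
    have := hafter (r + j) (by omega) (by omega)
    simp; omega
  omega

-- A's hand-written frequency loop builds exactly Counter(ori)
lemma dict_eq_counter (ori : List Int) :
    ori.foldl (fun d n => if d.contains n then d.insert n (d.getD n 0 + 1) else d.insert n (1 : Int))
      PySem.Dict.empty = PySem.Dict.counter ori := by
  rw [← PySem.Dict.foldl_insert_getD_add_one_eq_counter]
  apply PySem.List.foldl_congr_mem
  intro d n _
  by_cases h : d.contains n
  · rw [if_pos h]
  · rw [if_neg h, PySem.Dict.getD_of_not_contains _ _ (by simpa using h)]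
    norm_num

lemma counter_values_nonneg (ori : List Int) :
    ∀ v ∈ (PySem.Dict.counter ori).values, (0 : Int) ≤ v := by
  intro v hv
  simp only [PySem.Dict.values, PySem.Dict.items_counter, List.map_map, List.mem_map] at hv
  obtain ⟨x, _, rfl⟩ := hv
  simp

-- ===== VERDICT (by name: the statement is the Claim_ definition above) =====
theorem Solution_spec : Claim_equal_Solution := by
  intro ori k _
  unfold Spec_Solution Solution Solution_alt
  simp only [dict_eq_counter]
  set counts := PySem.Dict.counter ori with hc
  set sv := PySem.List.sorted counts.values (fun v => v) true with hsv
  have hnn : ∀ c ∈ sv, (0 : Int) ≤ c := by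
    intro c hcm
    exact counter_values_nonneg ori c ((PySem.List.mem_sorted _ _ _ _).mp hcm)
  rw [loop_eq_countP sv k _ hnn,
      countP_eq_bisectRight _ k (pairwise_accumFrom sv 0 hnn)]
  congr 1
  simp [PySem.Dict.keys, PySem.Dict.size]
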